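-- pv_equiv track=rewrite | github.com/chinkhor/VarCHEK | PresenceCondition.py | get_variable_count
-- ===== SOURCE A (Python) =====
-- def get_variable_count(formula):
--     disj = str(formula)
--     disj = disj.split('|')
--     disj_count = len(disj)
--     mix_count = 0
--     for var in disj:
--         conj = var.split('&')
--         mix_count = mix_count + len(conj)
--     if disj_count == mix_count:
--         return 1
--     else:
--         return mix_count
-- ===== SOURCE B (Python) =====
-- def get_variable_count(formula):
--     s = str(formula)
--     amps = s.count('&')
--     if amps == 0:
--         return 1
--     return amps + s.count('|') + 1
-- ===== Notes on version B (the rewrite author's own statement) =====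
-- stated objective: simpler
-- what changed: B computes the result in closed form from the counts of '&' and '|' characters (1 if no '&', else count('&')+count('|')+1) instead of splitting on '|' and looping over the parts splitting each on '&'.
import Mathlib
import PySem

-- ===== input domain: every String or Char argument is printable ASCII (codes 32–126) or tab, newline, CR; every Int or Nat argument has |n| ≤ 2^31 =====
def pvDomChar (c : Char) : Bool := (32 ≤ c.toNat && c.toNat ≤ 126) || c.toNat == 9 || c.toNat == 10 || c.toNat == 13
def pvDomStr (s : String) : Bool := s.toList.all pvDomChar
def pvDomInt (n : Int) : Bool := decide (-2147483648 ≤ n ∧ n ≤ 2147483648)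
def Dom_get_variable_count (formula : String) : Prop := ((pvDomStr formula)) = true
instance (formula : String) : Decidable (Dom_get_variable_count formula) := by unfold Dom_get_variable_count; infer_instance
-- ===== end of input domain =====

-- B replaces A's split-on-'|' loop of splits-on-'&' by the closed form 1 / count('&')+count('|')+1 (simpler; same cost).

-- ===== PORT A =====
-- str(formula) on a str is the identity; .split('|') / .split('&') with a nonempty
-- separator is exactly PySem.Chars.splitOn on the character list.
def get_variable_count (formula : String) : Int :=
  let disj := PySem.Chars.splitOn formula.toList ['|']
  let disj_count : Int := (disj.length : Int)
  let mix_count : Int :=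
    disj.foldl (fun mix var => mix + ((PySem.Chars.splitOn var ['&']).length : Int)) 0
  if disj_count = mix_count then 1 else mix_count

-- ===== PORT B =====
-- s.count(sub) is PySem.Str.count.
def get_variable_count_alt (formula : String) : Int :=
  let amps : Int := (PySem.Str.count formula "&" : Int)
  if amps = 0 then 1 else amps + (PySem.Str.count formula "|" : Int) + 1

-- ===== PRECONDITION & SPEC =====
def Spec_get_variable_count (formula : String) (out : Int) : Prop := out = get_variable_count_alt formula
instance (formula : String) (out : Int) : Decidable (Spec_get_variable_count formula out) := by unfold Spec_get_variable_count; infer_instance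

-- ===== CLAIM (what is proved, stated in full; the proofs are below) =====
def Claim_equal_get_variable_count : Prop := ∀ (formula : String), Dom_get_variable_count formula → Spec_get_variable_count formula (get_variable_count formula)

-- ===== LEMMAS AND PROOFS =====

-- Python's substring count with a single-character needle is List.count.
theorem countgo_single (c : Char) : ∀ (fuel : Nat) (l : List Char) (acc : Nat),
    l.length ≤ fuel → PySem.Chars.count.go [c] fuel l acc = acc + l.count c := by
  intro fuel
  induction fuel with
  | zero =>
    intro l acc h
    have : l = [] := List.eq_nil_of_length_eq_zero (Nat.le_zero.mp h)
    subst this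
    simp [PySem.Chars.count.go]
  | succ f ih =>
    intro l acc h
    cases l with
    | nil => simp [PySem.Chars.count.go]
    | cons x rest =>
      have hr : rest.length ≤ f := by simpa using h
      by_cases hx : x = c
      · subst hx
        simp [PySem.Chars.count.go, List.isPrefixOf, ih rest _ hr]
        omega
      · have : ([c].isPrefixOf (x :: rest)) = false := by
          simp [List.isPrefixOf]
          exact fun h' => hx h'.symm
        simp [PySem.Chars.count.go, this, ih rest _ hr, hx]

theorem count_single (s : List Char) (c : Char) :
    PySem.Chars.count s [c] = s.count c := by
  simp [PySem.Chars.count, countgo_single c s.length s 0 (le_refl _)]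

-- length of a single-character split: one more part than occurrences of the separator
theorem splitOnGo_length (c : Char) : ∀ (fuel : Nat) (l cur : List Char) (acc : List (List Char)),
    l.length ≤ fuel →
    (PySem.Chars.splitOn.go [c] fuel l cur acc).length = acc.length + l.count c + 1 := by
  intro fuel
  induction fuel with
  | zero =>
    intro l cur acc h
    have : l = [] := List.eq_nil_of_length_eq_zero (Nat.le_zero.mp h)
    subst this
    simp [PySem.Chars.splitOn.go]
  | succ f ih =>
    intro l cur acc h
    cases l with
    | nil => simp [PySem.Chars.splitOn.go]
    | cons x rest =>
      have hr : rest.length ≤ f := by simpa using h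
      by_cases hx : x = c
      · subst hx
        simp [PySem.Chars.splitOn.go, List.isPrefixOf, ih rest _ _ hr]
        omega
      · have : ([c].isPrefixOf (x :: rest)) = false := by
          simp [List.isPrefixOf]
          exact fun h' => hx h'.symm
        simp [PySem.Chars.splitOn.go, this, ih rest _ _ hr, hx]

theorem splitOn_length (s : List Char) (c : Char) :
    (PySem.Chars.splitOn s [c]).length = s.count c + 1 := by
  simp [PySem.Chars.splitOn, splitOnGo_length c (s.length + 1) s [] [] (by omega)]

-- the parts of a single-character split together contain every occurrence of any other character
theorem splitOnGo_sum (c d : Char) (hdc : d ≠ c) :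
    ∀ (fuel : Nat) (l cur : List Char) (acc : List (List Char)),
    l.length ≤ fuel →
    ((PySem.Chars.splitOn.go [c] fuel l cur acc).map (fun p => p.count d)).sum
      = (acc.map (fun p => p.count d)).sum + cur.count d + l.count d := by
  intro fuel
  induction fuel with
  | zero =>
    intro l cur acc h
    have : l = [] := List.eq_nil_of_length_eq_zero (Nat.le_zero.mp h)
    subst this
    simp [PySem.Chars.splitOn.go, List.map_reverse, List.sum_reverse]
  | succ f ih =>
    intro l cur acc h
    cases l with
    | nil => simp [PySem.Chars.splitOn.go, List.map_reverse, List.sum_reverse]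
    | cons x rest =>
      have hr : rest.length ≤ f := by simpa using h
      by_cases hx : x = c
      · subst hx
        have hd : d ≠ x := hdc
        simp [PySem.Chars.splitOn.go, List.isPrefixOf, ih rest _ _ hr, Ne.symm hd]
        omega
      · have hp : ([c].isPrefixOf (x :: rest)) = false := by
          simp [List.isPrefixOf]
          exact fun h' => hx h'.symm
        simp [PySem.Chars.splitOn.go, hp, ih rest _ _ hr, List.count_cons]
        by_cases hxd : x = d <;> simp [hxd] <;> omega

theorem splitOn_sum (s : List Char) (c d : Char) (hdc : d ≠ c) :
    ((PySem.Chars.splitOn s [c]).map (fun p => p.count d)).sum = s.count d := by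
  simp [PySem.Chars.splitOn, splitOnGo_sum c d hdc (s.length + 1) s [] [] (by omega)]

-- closed form for A's loop:
theorem mix_count_eq (s : List Char) :
    (PySem.Chars.splitOn s ['|']).foldl
        (fun mix var => mix + ((PySem.Chars.splitOn var ['&']).length : Int)) 0
      = (s.count '&' : Int) + (s.count '|' : Int) + 1 := by
  rw [PySem.List.foldl_add]
  have h1 : ((PySem.Chars.splitOn s ['|']).map
      (fun var => ((PySem.Chars.splitOn var ['&']).length : Int))).sum
      = ((PySem.Chars.splitOn s ['|']).map (fun var => ((var.count '&' : Int) + 1))).sum := by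
    congr 1
    apply List.map_congr_left
    intro a _
    simp [splitOn_length]
  rw [h1]
  have h2 : ((PySem.Chars.splitOn s ['|']).map (fun var => ((var.count '&' : Int) + 1))).sum
      = ((PySem.Chars.splitOn s ['|']).map (fun var => (var.count '&' : Int))).sum
        + ((PySem.Chars.splitOn s ['|']).length : Int) := by
    induction PySem.Chars.splitOn s ['|'] with
    | nil => simp
    | cons p ps ihp => simp [ihp]; ring
  rw [h2]
  have h3 : ((PySem.Chars.splitOn s ['|']).map (fun var => (var.count '&' : Int))).sum
      = (s.count '&' : Int) := by
    rw [← splitOn_sum s '|' '&' (by decide)]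
    induction PySem.Chars.splitOn s ['|'] with
    | nil => simp
    | cons p ps ihp => simp [ihp]
  rw [h3, splitOn_length]
  push_cast
  ring

-- ===== VERDICT (by name: the statement is the Claim_ definition above) =====
theorem get_variable_count_spec : Claim_equal_get_variable_count := by
  intro formula _
  have e1 : "&".toList = ['&'] := rfl
  have e2 : "|".toList = ['|'] := rfl
  simp only [Spec_get_variable_count, get_variable_count, get_variable_count_alt,
    PySem.Str.count_eq, e1, e2, count_single]
  rw [mix_count_eq, splitOn_length]
  by_cases h : formula.toList.count '&' = 0
  · simp [h]
  · push_cast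
    split_ifs <;> omega
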